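-- pv_equiv track=rewrite | github.com/DanielAbabu/Competitive-Programming | leetcode/leetcode/maximum-score-after-splitting-a-string.py | maxScore
-- ===== SOURCE A (Python) =====
-- def maxScore(s: str) -> int:
--     ones = sum(list(map(int,list(s))))
--     zero = maxm = 0
--
--
--     for i in range(len(s)-1):
--         if s[i] == "0":
--             zero += 1
--         else:
--             ones -= 1
--
--         maxm = max(maxm, zero + ones)
--
--     return maxm
-- ===== SOURCE B (Python) =====
-- def maxScore(s: str) -> int:
--     # Brute force over splits: recount the left part's zeros per split with str.count
--     # and use the identity score(i) = total + 2*zeros(s[:i+1]) - (i+1),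
--     # where total = sum of the digit values of the whole string.
--     total = sum(map(int, s))
--     return max((total + 2 * s[:i + 1].count("0") - (i + 1) for i in range(len(s) - 1)),
--                default=0)
-- ===== Notes on version B (the rewrite author's own statement) =====
-- stated objective: alternative
-- what changed: A maintains running left-zero and right-one counters interleaved with the max in one loop; B brute-forces each split independently, recounting the zero characters of the left slice with str.count and using the closed-form score total + 2*zeros - split_length, taking the max with a default for short strings.
import Mathlib
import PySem

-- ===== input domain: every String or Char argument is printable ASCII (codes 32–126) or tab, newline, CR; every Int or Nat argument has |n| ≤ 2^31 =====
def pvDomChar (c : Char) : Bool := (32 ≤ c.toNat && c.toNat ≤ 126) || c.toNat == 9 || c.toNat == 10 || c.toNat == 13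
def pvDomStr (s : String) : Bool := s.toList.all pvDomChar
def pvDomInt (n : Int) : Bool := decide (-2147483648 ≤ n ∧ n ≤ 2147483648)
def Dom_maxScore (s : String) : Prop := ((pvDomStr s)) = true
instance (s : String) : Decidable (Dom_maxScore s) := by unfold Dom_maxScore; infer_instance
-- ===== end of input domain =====

-- B replaces A's running zero/one counters with a brute-force scan over splits that
-- recounts the left part's zeros per split and uses the closed form
-- score(i) = total + 2*zeros(s[:i+1]) - (i+1)   (alternative algorithm, not faster).

-- ===== PORT A =====
-- A: ones = sum(int(c) for c in s); one loop over i < len(s)-1 updating (ones, zero, maxm).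
def maxScore (s : String) : Int :=
  let cs := s.toList
  let ones : Int := (cs.map (fun c => ((c.toNat : Int) - 48))).sum
  let r := cs.dropLast.foldl
    (fun (st : Int × Int × Int) c =>
      let ones := st.1
      let zero := st.2.1
      let maxm := st.2.2
      let p := if c = '0' then (ones, zero + 1) else (ones - 1, zero)
      (p.1, p.2, max maxm (p.2 + p.1)))
    (ones, 0, 0)
  r.2.2

-- ===== PORT B =====
-- B: total = sum of digit values; max over i of total + 2*count('0', s[:i+1]) - (i+1), default 0.
def maxScore_alt (s : String) : Int :=
  let cs := s.toList
  let total : Int := (cs.map (fun c => ((c.toNat : Int) - 48))).sum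
  let scores := (List.range (cs.length - 1)).map
    (fun i => total + 2 * (((cs.take (i + 1)).count '0' : Nat) : Int) - ((i : Int) + 1))
  match scores with
  | [] => 0
  | h :: t => t.foldl max h

-- ===== PRECONDITION & SPEC =====
-- Pre_ excludes strings containing a non-digit character: there Python's int(c) raises ValueError in both A and B.
def Pre_maxScore (s : String) : Prop := (s.toList.all (fun c => c.isDigit)) = true
instance (s : String) : Decidable (Pre_maxScore s) := by unfold Pre_maxScore; infer_instance
def pvWitness_maxScore : String := "0110"

def Spec_maxScore (s : String) (out : Int) : Prop := out = maxScore_alt s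
instance (s : String) (out : Int) : Decidable (Spec_maxScore s out) := by unfold Spec_maxScore; infer_instance

-- ===== CLAIM (what is proved, stated in full; the proofs are below) =====
def Claim_equal_maxScore : Prop := ∀ (s : String), Dom_maxScore s → Pre_maxScore s → Spec_maxScore s (maxScore s)

-- ===== LEMMAS AND PROOFS =====

-- The list of running scores zero+ones produced along A's loop.
def pvScoresRec (l : List Char) (o z : Int) : List Int :=
  match l with
  | [] => []
  | c :: t =>
    let p := if c = '0' then (o, z + 1) else (o - 1, z)
    (p.2 + p.1) :: pvScoresRec t p.1 p.2

-- A's fold returns the max of m and all running scores.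
theorem pvFold_max (l : List Char) : ∀ (o z m : Int),
    (l.foldl
      (fun (st : Int × Int × Int) c =>
        let ones := st.1
        let zero := st.2.1
        let maxm := st.2.2
        let p := if c = '0' then (ones, zero + 1) else (ones - 1, zero)
        (p.1, p.2, max maxm (p.2 + p.1)))
      (o, z, m)).2.2
    = (pvScoresRec l o z).foldl max m := by
  induction l with
  | nil => intro o z m; simp [pvScoresRec]
  | cons c t ih =>
    intro o z m
    by_cases h : c = '0' <;> simp [pvScoresRec, h, List.foldl, ih]

-- The running scores admit a closed form over prefixes of l.
theorem pvScoresRec_closed (l : List Char) : ∀ (o z : Int),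
    pvScoresRec l o z
      = (List.range l.length).map
          (fun i => z + o + 2 * (((l.take (i + 1)).count '0' : Nat) : Int) - ((i : Int) + 1)) := by
  induction l with
  | nil => intro o z; simp [pvScoresRec]
  | cons c t ih =>
    intro o z
    rw [List.length_cons, List.range_succ_eq_map, List.map_cons, List.map_map]
    by_cases h : c = '0' <;>
      simp only [pvScoresRec, h, ite_true, ite_false] <;> congr 1
    · simp; ring
    · rw [ih]
      apply List.map_congr_left
      intro i _
      simp
      ring
    · simp [h]; ring_nf
    · rw [ih]
      apply List.map_congr_left
      intro i _
      simp [h]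
      ring

-- Prefixes of dropLast of length ≤ n-1 are prefixes of the list itself.
theorem pvTake_dropLast (l : List Char) (i : Nat) (hi : i + 1 ≤ l.length - 1) :
    l.dropLast.take (i + 1) = l.take (i + 1) := by
  rw [List.dropLast_eq_take, List.take_take]
  congr 1
  omega

theorem pvDigit_bounds (c : Char) (h : c.isDigit = true) : 48 ≤ c.toNat ∧ c.toNat ≤ 57 := by
  simp only [Char.isDigit, Bool.and_eq_true, decide_eq_true_eq,
    UInt32.le_iff_toNat_le, Char.toNat_val] at h
  simpa using h

theorem pvToNat48 (c : Char) (h : c.toNat = 48) : c = '0' := by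
  apply Char.ext
  apply UInt32.toNat_inj.mp
  simpa [Char.toNat_val] using h

-- On digit strings each digit value is nonnegative, hence so is their sum.
theorem pvSum_digits_nonneg (l : List Char) (h : ∀ c ∈ l, c.isDigit = true) :
    0 ≤ (l.map (fun c => ((c.toNat : Int) - 48))).sum := by
  apply List.sum_nonneg
  intro x hx
  simp only [List.mem_map] at hx
  obtain ⟨c, hc, rfl⟩ := hx
  have := (pvDigit_bounds c (h c hc)).1
  omega

-- The score of the first split is nonnegative on a digit string.
theorem pvFirst_nonneg (c : Char) (t : List Char) (h : ∀ x ∈ c :: t, x.isDigit = true) :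
    0 ≤ ((c :: t).map (fun c => ((c.toNat : Int) - 48))).sum
        + 2 * ((((c :: t).take 1).count '0' : Nat) : Int) - 1 := by
  have ht := pvSum_digits_nonneg t (fun x hx => h x (List.mem_cons_of_mem _ hx))
  have hc := (pvDigit_bounds c (h c List.mem_cons_self)).1
  simp only [List.map_cons, List.sum_cons, List.take_succ_cons, List.take_zero,
    List.count_cons, List.count_nil]
  by_cases h0 : c = '0'
  · subst h0; simp; omega
  · have : c.toNat ≠ 48 := fun he => h0 (pvToNat48 c he)
    simp [h0, beq_iff_eq]
    omega

-- Main list-level equality: A's loop equals B's brute-force-over-splits maximum.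
theorem pvMain (cs : List Char) (h : ∀ c ∈ cs, c.isDigit = true) :
    (cs.dropLast.foldl
      (fun (st : Int × Int × Int) c =>
        let ones := st.1
        let zero := st.2.1
        let maxm := st.2.2
        let p := if c = '0' then (ones, zero + 1) else (ones - 1, zero)
        (p.1, p.2, max maxm (p.2 + p.1)))
      ((cs.map (fun c => ((c.toNat : Int) - 48))).sum, 0, 0)).2.2
    = (match (List.range (cs.length - 1)).map
          (fun i => (cs.map (fun c => ((c.toNat : Int) - 48))).sum
            + 2 * (((cs.take (i + 1)).count '0' : Nat) : Int) - ((i : Int) + 1)) with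
       | [] => 0
       | h :: t => t.foldl max h) := by
  rw [pvFold_max, pvScoresRec_closed, List.length_dropLast]
  have hmap : (List.range (cs.length - 1)).map
      (fun i => 0 + (cs.map (fun c => ((c.toNat : Int) - 48))).sum
        + 2 * (((cs.dropLast.take (i + 1)).count '0' : Nat) : Int) - ((i : Int) + 1))
      = (List.range (cs.length - 1)).map
      (fun i => (cs.map (fun c => ((c.toNat : Int) - 48))).sum
        + 2 * (((cs.take (i + 1)).count '0' : Nat) : Int) - ((i : Int) + 1)) := by
    apply List.map_congr_left
    intro i hi
    rw [List.mem_range] at hi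
    rw [pvTake_dropLast cs i (by omega), zero_add]
  rw [hmap]
  cases cs with
  | nil => simp
  | cons c t =>
    cases t with
    | nil => simp
    | cons c2 t2 =>
      have hlen : (c :: c2 :: t2).length - 1 = t2.length + 1 := by simp
      rw [hlen, List.range_succ_eq_map, List.map_cons, List.map_map]
      have h0 := pvFirst_nonneg c (c2 :: t2) h
      simp only [List.foldl_cons]
      rw [max_eq_right (by simpa using h0)]

-- ===== VERDICT (by name: the statement is the Claim_ definition above) =====
theorem maxScore_spec : Claim_equal_maxScore := by
  intro s _ hp
  unfold Pre_maxScore at hp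
  rw [List.all_eq_true] at hp
  unfold Spec_maxScore maxScore maxScore_alt
  exact pvMain s.toList (fun c hc => by simpa using hp c hc)
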